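-- pv_equiv track=rewrite | github.com/willydot21/frequencies-ex1 | utils.py | statistical_mode
-- ===== SOURCE A (Python) =====
-- def get_xifi_hash(elements: list):
--
--     simplified_hash = {}
--
--     for xi in elements:
--         fi = elements.count(xi)
--         simplified_hash[xi] = fi
--
--     return simplified_hash
--
-- def statistical_mode(elements: list):
--
--     xifi_hash = get_xifi_hash(elements)
--     fi_list = xifi_hash.values()
--     max_fi = max(fi_list)
--     mode = []
--
--     for xi, fi in xifi_hash.items():
--         if fi == max_fi:
--             mode.append(str(xi))
--
--     if len(mode) == 1:
--         return mode[0]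
--
--     if len(mode) > 1:
--         return f'{mode[0]} - {mode[len(mode)-1]}'
-- ===== SOURCE B (Python) =====
-- def statistical_mode(elements: list):
--     # Online single-pass mode tracking: maintain the running max frequency and the
--     # current winner boundary (first/last by first-occurrence order) while counting.
--     first_pos = {}
--     counts = {}
--     best = 0
--     first = last = None
--     lo = hi = -1
--     nwin = 0
--     for i, x in enumerate(elements):
--         p = first_pos.setdefault(x, i)
--         c = counts.get(x, 0) + 1
--         counts[x] = c
--         if c > best:
--             best = c
--             first = last = x
--             lo = hi = p
--             nwin = 1
--         elif c == best:
--             nwin += 1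
--             if p < lo:
--                 first, lo = x, p
--             if p > hi:
--                 last, hi = x, p
--     if nwin == 1:
--         return str(first)
--     return f'{first} - {last}'
-- ===== Notes on version B (the rewrite author's own statement) =====
-- stated objective: faster
-- what changed: Replaces A's quadratic build-counts-then-max-then-filter pipeline by a single online pass that updates each element's count incrementally and maintains the running max frequency and the current winner boundary (first/last winner by first-occurrence position) as it goes, with no post-pass over the dict.
import Mathlib
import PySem

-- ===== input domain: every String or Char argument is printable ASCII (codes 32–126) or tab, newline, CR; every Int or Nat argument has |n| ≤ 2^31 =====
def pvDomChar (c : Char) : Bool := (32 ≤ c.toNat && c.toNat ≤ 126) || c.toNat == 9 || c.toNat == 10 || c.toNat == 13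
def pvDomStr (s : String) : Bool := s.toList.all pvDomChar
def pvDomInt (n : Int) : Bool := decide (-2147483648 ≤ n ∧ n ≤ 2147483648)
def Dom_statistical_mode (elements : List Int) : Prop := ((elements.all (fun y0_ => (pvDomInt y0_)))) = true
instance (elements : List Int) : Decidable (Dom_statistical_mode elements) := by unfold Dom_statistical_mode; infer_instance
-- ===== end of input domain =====

-- B replaces A's quadratic build-counts/max/filter pipeline with a single online pass that
-- maintains the running max frequency and the current winner boundary while counting (objective: faster).


-- ===== PORT A =====
def get_xifi_hash (elements : List Int) : PySem.Dict Int Int :=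
  elements.foldl (fun d xi => d.insert xi ((elements.count xi : Int))) PySem.Dict.empty

def statistical_mode (elements : List Int) : String :=
  let xifi_hash := get_xifi_hash elements
  let fi_list := xifi_hash.values
  match PySem.List.max? fi_list (fun y => y) with  -- max(fi_list); none = ValueError, excluded by Pre_
  | none => ""
  | some max_fi =>
    let mode := xifi_hash.items.foldl
      (fun m p => if p.2 == max_fi then m ++ [PySem.Int.toStr p.1] else m) []
    if mode.length == 1 then PySem.List.pyGetD mode 0 ""
    else if mode.length > 1 then
      PySem.List.pyGetD mode 0 "" ++ " - " ++ PySem.List.pyGetD mode ((mode.length : Int) - 1) ""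
    else ""  -- Python falls off the end (None); unreachable on nonempty elements

-- ===== PORT B =====
-- str(o) for o : Optional[int] (None only on the empty input, which Pre_ excludes)
def pyStrOptInt (o : Option Int) : String :=
  match o with
  | none => "None"
  | some v => PySem.Int.toStr v

structure BSt where
  fp : PySem.Dict Int Int
  counts : PySem.Dict Int Int
  best : Int
  first : Option Int
  last : Option Int
  lo : Int
  hi : Int
  nwin : Int
deriving Repr, DecidableEq

-- one iteration of Source B's loop body, state threaded explicitly
def bStep (s : BSt) (ix : Int × Int) : BSt :=
  let i := ix.1
  let x := ix.2
  let pf : Int × PySem.Dict Int Int :=       -- p = first_pos.setdefault(x, i)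
    match s.fp.get? x with
    | some p => (p, s.fp)
    | none => (i, s.fp.insert x i)
  let p := pf.1
  let c := s.counts.getD x 0 + 1             -- c = counts.get(x, 0) + 1
  let counts' := s.counts.insert x c         -- counts[x] = c
  if c > s.best then
    { fp := pf.2, counts := counts', best := c, first := some x, last := some x,
      lo := p, hi := p, nwin := 1 }
  else if c == s.best then
    let fl : Option Int × Int := if p < s.lo then (some x, p) else (s.first, s.lo)
    let lh : Option Int × Int := if p > s.hi then (some x, p) else (s.last, s.hi)
    { fp := pf.2, counts := counts', best := s.best, first := fl.1, last := lh.1,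
      lo := fl.2, hi := lh.2, nwin := s.nwin + 1 }
  else
    { fp := pf.2, counts := counts', best := s.best, first := s.first, last := s.last,
      lo := s.lo, hi := s.hi, nwin := s.nwin }

def bInit : BSt :=
  { fp := PySem.Dict.empty, counts := PySem.Dict.empty, best := 0,
    first := none, last := none, lo := -1, hi := -1, nwin := 0 }

def statistical_mode_alt (elements : List Int) : String :=
  let st := (PySem.List.enumerate elements).foldl bStep bInit
  if st.nwin == 1 then pyStrOptInt st.first
  else pyStrOptInt st.first ++ " - " ++ pyStrOptInt st.last

-- ===== PRECONDITION & SPEC =====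
-- Python A raises ValueError (max of empty sequence) on the empty list; Pre_ excludes exactly that input.
def Pre_statistical_mode (elements : List Int) : Prop := elements ≠ []
instance (elements : List Int) : Decidable (Pre_statistical_mode elements) := by unfold Pre_statistical_mode; infer_instance
def pvWitness_statistical_mode : List Int := [3, 1, 3, 2]

def Spec_statistical_mode (elements : List Int) (out : String) : Prop := out = statistical_mode_alt elements
instance (elements : List Int) (out : String) : Decidable (Spec_statistical_mode elements out) := by unfold Spec_statistical_mode; infer_instance

-- ===== CLAIM (what is proved, stated in full; the proofs are below) =====
def Claim_equal_statistical_mode : Prop := ∀ (elements : List Int), Dom_statistical_mode elements → Pre_statistical_mode elements → Spec_statistical_mode elements (statistical_mode elements)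

-- ===== LEMMAS AND PROOFS =====

-- first-occurrence index of k in pre, as an Int (only used for k ∈ pre)
def pidx (pre : List Int) (k : Int) : Int := (((PySem.List.index? pre k).getD pre.length : Nat) : Int)

-- the winner set of a prefix: distinct elements (first-occurrence order) whose count is b
def winners (pre : List Int) (b : Int) : List Int :=
  (PySem.Set.ofList pre).filter (fun k => (pre.count k : Int) == b)

-- loop invariant of Source B's pass, after processing the prefix `pre`
structure LInv (pre : List Int) (st : BSt) : Prop where
  counts : ∀ k, st.counts.getD k 0 = (pre.count k : Int)
  fp : ∀ k, st.fp.get? k = (PySem.List.index? pre k).map (fun n => (n : Int))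
  ub : ∀ k ∈ pre, (pre.count k : Int) ≤ st.best
  fst : pre ≠ [] → ∃ f, st.first = some f ∧ f ∈ winners pre st.best ∧ st.lo = pidx pre f ∧
          ∀ k ∈ winners pre st.best, pidx pre f ≤ pidx pre k
  lst : pre ≠ [] → ∃ g, st.last = some g ∧ g ∈ winners pre st.best ∧ st.hi = pidx pre g ∧
          ∀ k ∈ winners pre st.best, pidx pre k ≤ pidx pre g
  nwin : st.nwin = ((winners pre st.best).length : Int)
  best0 : pre = [] → st.best = 0

theorem mem_winners (pre : List Int) (b : Int) (k : Int) :
    k ∈ winners pre b ↔ k ∈ pre ∧ (pre.count k : Int) = b := by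
  simp [winners, PySem.Set.mem_ofList]

theorem nodup_winners (pre : List Int) (b : Int) : (winners pre b).Nodup :=
  (PySem.Set.nodup_ofList pre).filter _

theorem pidx_append_of_mem (pre : List Int) (x k : Int) (h : k ∈ pre) :
    pidx (pre ++ [x]) k = pidx pre k := by
  rcases (PySem.List.index?_isSome_iff pre k).mpr h |> Option.isSome_iff_exists.mp with ⟨n, hn⟩
  unfold pidx
  rw [PySem.List.index?_append_of_mem _ h, hn]
  rfl

theorem pidx_append_self (pre : List Int) (x : Int) (h : x ∉ pre) :
    pidx (pre ++ [x]) x = (pre.length : Int) := by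
  unfold pidx
  rw [PySem.List.index?_append_singleton_self pre x h]
  simp

theorem pidx_lt_length (pre : List Int) (k : Int) (h : k ∈ pre) :
    pidx pre k < (pre.length : Int) := by
  rcases (PySem.List.index?_isSome_iff pre k).mpr h |> Option.isSome_iff_exists.mp with ⟨n, hn⟩
  rcases PySem.List.getElem_of_index?_eq_some hn with ⟨hlt, _, _⟩
  unfold pidx
  rw [hn]
  exact_mod_cast hlt

-- Set.ofList is ordered by first-occurrence index
theorem pairwise_pidx (l : List Int) :
    (PySem.Set.ofList l).Pairwise (fun a b => pidx l a < pidx l b) := by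
  induction l using List.reverseRecOn with
  | nil => simp [PySem.Set.ofList_nil]
  | append_singleton t x ih =>
    rw [PySem.Set.ofList_append_singleton, PySem.Set.add_eq_ite]
    by_cases hx : x ∈ PySem.Set.ofList t
    · rw [if_pos hx]
      refine ih.imp_of_mem ?_
      intro a b ha hb hab
      have ha' := (PySem.Set.mem_ofList t a).mp ha
      have hb' := (PySem.Set.mem_ofList t b).mp hb
      rw [pidx_append_of_mem _ _ _ ha', pidx_append_of_mem _ _ _ hb']
      exact hab
    · rw [if_neg hx]
      have hx' : x ∉ t := fun h => hx ((PySem.Set.mem_ofList t x).mpr h)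
      rw [List.pairwise_append]
      refine ⟨ih.imp_of_mem ?_, by simp, ?_⟩
      · intro a b ha hb hab
        have ha' := (PySem.Set.mem_ofList t a).mp ha
        have hb' := (PySem.Set.mem_ofList t b).mp hb
        rw [pidx_append_of_mem _ _ _ ha', pidx_append_of_mem _ _ _ hb']
        exact hab
      · intro a ha b hb
        have ha' := (PySem.Set.mem_ofList t a).mp ha
        have hb' : b = x := by simpa using hb
        subst hb'
        rw [pidx_append_of_mem _ _ _ ha', pidx_append_self _ _ hx']
        exact pidx_lt_length t a ha'

theorem pairwise_pidx_winners (l : List Int) (b : Int) :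
    (winners l b).Pairwise (fun a b => pidx l a < pidx l b) :=
  (pairwise_pidx l).filter _

-- in a strictly f-increasing list, the minimal element is the head …
theorem head_of_min {α : Type} (f : α → Int) (l : List α)
    (hp : l.Pairwise (fun a b => f a < f b)) (m : α) (hm : m ∈ l)
    (hmin : ∀ k ∈ l, f m ≤ f k) (hne : l ≠ []) : l.head hne = m := by
  cases l with
  | nil => exact absurd rfl hne
  | cons a t =>
    rcases List.mem_cons.mp hm with h | h
    · simpa using h.symm
    · have h1 : f a < f m := (List.pairwise_cons.mp hp).1 m h
      have h2 : f m ≤ f a := hmin a (by simp)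
      omega
  
-- … and the maximal one is the last
theorem getLast_of_max {α : Type} (f : α → Int) (l : List α)
    (hp : l.Pairwise (fun a b => f a < f b)) (m : α) (hm : m ∈ l)
    (hmax : ∀ k ∈ l, f k ≤ f m) (hne : l ≠ []) : l.getLast hne = m := by
  have hne' : l.reverse ≠ [] := by simpa using hne
  have hrev : l.reverse.Pairwise (fun a b => f b < f a) := by
    rw [List.pairwise_reverse]; exact hp
  have := head_of_min (fun a => -f a) l.reverse
    (hrev.imp (by intro a b h; show -f _ < -f _; omega)) m (by simpa using hm)
    (fun k hk => by show -f _ ≤ -f _; have := hmax k (by simpa using hk); omega) hne'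
  rw [← List.getLast_eq_head_reverse hne] at this
  exact this

-- max(xs) (no key) is the element every other is ≤
theorem max?_eq_some_of (xs : List Int) (m : Int) (hm : m ∈ xs)
    (hub : ∀ y ∈ xs, y ≤ m) : PySem.List.max? xs (fun y => y) = some m := by
  cases hx : PySem.List.max? xs (fun y => y) with
  | none =>
    have : xs = [] := (PySem.List.max?_eq_none_iff xs _).mp hx
    simp [this] at hm
  | some m' =>
    have h1 : m ≤ m' := PySem.List.max?_isMax hx m hm
    have h2 : m' ≤ m := hub m' (PySem.List.max?_mem hx)
    exact congrArg some (le_antisymm h2 h1)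

theorem inv_init : LInv [] bInit := by
  constructor <;> simp [bInit, winners, PySem.Set.ofList_nil]


-- (pre ++ [x]).count as pre.count plus the new occurrence
theorem count_append_int (pre : List Int) (x : Int) (k : Int) :
    (((pre ++ [x]).count k : Nat) : Int) = (pre.count k : Int) + (if k = x then 1 else 0) := by
  have h1 : List.count k [x] = if k = x then 1 else 0 := by
    by_cases hk : k = x
    · simp [hk]
    · have hk' : ¬ x = k := fun e => hk e.symm
      simp [hk, hk']
  rw [List.count_append, h1]
  by_cases hk : k = x <;> simp [hk]

theorem index?_append_not_mem (pre : List Int) (x k : Int) (hk : k ∉ pre) (hkx : k ≠ x) :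
    PySem.List.index? (pre ++ [x]) k = none := by
  rw [PySem.List.index?_eq_none_iff]
  simp [hk, hkx]

theorem winners_length_cast (pre : List Int) (b : Int) (L : List Int) (hnd : L.Nodup)
    (hiff : ∀ k, k ∈ winners pre b ↔ k ∈ L) :
    (((winners pre b).length : Nat) : Int) = (L.length : Int) := by
  have hperm : (winners pre b).Perm L :=
    (List.perm_ext_iff_of_nodup (nodup_winners pre b) hnd).mpr hiff
  exact_mod_cast hperm.length_eq

-- invariant preservation, case c > best (new unique winner x)
theorem step_case1 (pre : List Int) (x : Int) (st : BSt) (h : LInv pre st)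
    (fp2 : PySem.Dict Int Int) (p : Int)
    (hfp2 : ∀ k, fp2.get? k = (PySem.List.index? (pre ++ [x]) k).map (fun n => (n : Int)))
    (hp : p = pidx (pre ++ [x]) x)
    (hgt : st.counts.getD x 0 + 1 > st.best) :
    LInv (pre ++ [x]) ⟨fp2, st.counts.insert x (st.counts.getD x 0 + 1),
      st.counts.getD x 0 + 1, some x, some x, p, p, 1⟩ := by
  have hcx := h.counts x
  have hc : st.counts.getD x 0 + 1 = (pre.count x : Int) + 1 := by rw [hcx]
  have hcnt' : ∀ k, (st.counts.insert x (st.counts.getD x 0 + 1)).getD k 0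
      = (((pre ++ [x]).count k : Nat) : Int) := by
    intro k
    rw [PySem.Dict.getD_insert, count_append_int pre x k]
    by_cases hk : k = x
    · subst hk; simp [hc]
    · simp [hk, h.counts k]
  have hub : ∀ k ∈ pre ++ [x], (((pre ++ [x]).count k : Nat) : Int) ≤ st.counts.getD x 0 + 1 := by
    intro k hk
    rw [count_append_int pre x k]
    by_cases hkx : k = x
    · subst hkx; omega
    · have hk' : k ∈ pre := by
        rcases List.mem_append.mp hk with h' | h'
        · exact h'
        · exact absurd (by simpa using h') hkx
      have := h.ub k hk'
      simp only [hkx, if_false]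
      omega
  have hWmem : ∀ k, k ∈ winners (pre ++ [x]) (st.counts.getD x 0 + 1) ↔ k = x := by
    intro k
    rw [mem_winners]
    constructor
    · rintro ⟨hk, hkc⟩
      by_contra hkx
      have hk' : k ∈ pre := by
        rcases List.mem_append.mp hk with h' | h'
        · exact h'
        · exact absurd (by simpa using h') hkx
      rw [count_append_int pre x k, if_neg hkx] at hkc
      have := h.ub k hk'
      omega
    · rintro rfl
      refine ⟨by simp, ?_⟩
      rw [count_append_int, if_pos rfl]
      omega
  refine ⟨hcnt', hfp2, hub, ?_, ?_, ?_, by simp⟩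
  · intro _
    exact ⟨x, rfl, (hWmem x).mpr rfl, hp, fun k hk => by rw [(hWmem k).mp hk]⟩
  · intro _
    exact ⟨x, rfl, (hWmem x).mpr rfl, hp, fun k hk => by rw [(hWmem k).mp hk]⟩
  · show (1 : Int) = _
    rw [winners_length_cast _ _ [x] (by simp) (fun k => by rw [hWmem k]; simp)]
    simp

-- invariant preservation, case c == best (x joins the winner set)
theorem step_case2 (pre : List Int) (x : Int) (st : BSt) (h : LInv pre st)
    (fp2 : PySem.Dict Int Int) (p : Int)
    (hfp2 : ∀ k, fp2.get? k = (PySem.List.index? (pre ++ [x]) k).map (fun n => (n : Int)))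
    (hp : p = pidx (pre ++ [x]) x)
    (heq : st.counts.getD x 0 + 1 = st.best) :
    LInv (pre ++ [x]) ⟨fp2, st.counts.insert x (st.counts.getD x 0 + 1), st.best,
      (if p < st.lo then ((some x : Option Int), p) else (st.first, st.lo)).1,
      (if p > st.hi then ((some x : Option Int), p) else (st.last, st.hi)).1,
      (if p < st.lo then ((some x : Option Int), p) else (st.first, st.lo)).2,
      (if p > st.hi then ((some x : Option Int), p) else (st.last, st.hi)).2,
      st.nwin + 1⟩ := by
  have hcx := h.counts x
  have hc : st.counts.getD x 0 + 1 = (pre.count x : Int) + 1 := by rw [hcx]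
  have hpre : pre ≠ [] := by
    intro h0
    have hb := h.best0 h0
    rw [hc, h0] at heq
    simp at heq
    omega
  have hcnt' : ∀ k, (st.counts.insert x (st.counts.getD x 0 + 1)).getD k 0
      = (((pre ++ [x]).count k : Nat) : Int) := by
    intro k
    rw [PySem.Dict.getD_insert, count_append_int pre x k]
    by_cases hk : k = x
    · subst hk; simp [hc]
    · simp [hk, h.counts k]
  have hub : ∀ k ∈ pre ++ [x], (((pre ++ [x]).count k : Nat) : Int) ≤ st.best := by
    intro k hk
    rw [count_append_int pre x k]
    by_cases hkx : k = x
    · subst hkx; omega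
    · have hk' : k ∈ pre := by
        rcases List.mem_append.mp hk with h' | h'
        · exact h'
        · exact absurd (by simpa using h') hkx
      have := h.ub k hk'
      simp only [hkx, if_false]
      omega
  have hxW : x ∉ winners pre st.best := by
    rw [mem_winners]
    rintro ⟨-, hcnt⟩
    omega
  have hWmem : ∀ k, k ∈ winners (pre ++ [x]) st.best ↔ k ∈ winners pre st.best ∨ k = x := by
    intro k
    rw [mem_winners, mem_winners]
    constructor
    · rintro ⟨hk, hkc⟩
      by_cases hkx : k = x
      · exact Or.inr hkx
      · have hk' : k ∈ pre := by
          rcases List.mem_append.mp hk with h' | h'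
          · exact h'
          · exact absurd (by simpa using h') hkx
        rw [count_append_int pre x k, if_neg hkx] at hkc
        exact Or.inl ⟨hk', by omega⟩
    · rintro (⟨hk, hkc⟩ | rfl)
      · have hkx : k ≠ x := by rintro rfl; omega
        refine ⟨List.mem_append_left _ hk, ?_⟩
        rw [count_append_int pre x k, if_neg hkx]
        omega
      · refine ⟨by simp, ?_⟩
        rw [count_append_int, if_pos rfl]
        omega
  obtain ⟨f, hf1, hf2, hf3, hf4⟩ := h.fst hpre
  obtain ⟨g, hg1, hg2, hg3, hg4⟩ := h.lst hpre
  have hfpre : f ∈ pre := ((mem_winners _ _ _).mp hf2).1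
  have hgpre : g ∈ pre := ((mem_winners _ _ _).mp hg2).1
  refine ⟨hcnt', hfp2, hub, ?_, ?_, ?_, by simp⟩
  · intro _
    by_cases hplo : p < st.lo
    · rw [if_pos hplo]
      refine ⟨x, rfl, (hWmem x).mpr (Or.inr rfl), hp, ?_⟩
      intro k hk
      rcases (hWmem k).mp hk with hkW | rfl
      · have hkpre : k ∈ pre := ((mem_winners _ _ _).mp hkW).1
        rw [← hp, pidx_append_of_mem _ _ _ hkpre]
        have := hf4 k hkW
        rw [hf3] at hplo
        omega
      · omega
    · rw [if_neg hplo]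
      refine ⟨f, hf1, (hWmem f).mpr (Or.inl hf2), ?_, ?_⟩
      · rw [hf3, pidx_append_of_mem _ _ _ hfpre]
      · intro k hk
        rw [pidx_append_of_mem _ _ _ hfpre]
        rcases (hWmem k).mp hk with hkW | rfl
        · have hkpre : k ∈ pre := ((mem_winners _ _ _).mp hkW).1
          rw [pidx_append_of_mem _ _ _ hkpre]
          exact hf4 k hkW
        · rw [← hp, ← hf3]
          omega
  · intro _
    by_cases hphi : p > st.hi
    · rw [if_pos hphi]
      refine ⟨x, rfl, (hWmem x).mpr (Or.inr rfl), hp, ?_⟩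
      intro k hk
      rcases (hWmem k).mp hk with hkW | rfl
      · have hkpre : k ∈ pre := ((mem_winners _ _ _).mp hkW).1
        rw [← hp, pidx_append_of_mem _ _ _ hkpre]
        have := hg4 k hkW
        rw [hg3] at hphi
        omega
      · omega
    · rw [if_neg hphi]
      refine ⟨g, hg1, (hWmem g).mpr (Or.inl hg2), ?_, ?_⟩
      · rw [hg3, pidx_append_of_mem _ _ _ hgpre]
      · intro k hk
        rw [pidx_append_of_mem _ _ _ hgpre]
        rcases (hWmem k).mp hk with hkW | rfl
        · have hkpre : k ∈ pre := ((mem_winners _ _ _).mp hkW).1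
          rw [pidx_append_of_mem _ _ _ hkpre]
          exact hg4 k hkW
        · rw [← hp, ← hg3]
          omega
  · show st.nwin + 1 = _
    rw [winners_length_cast _ _ (x :: winners pre st.best)
      (List.nodup_cons.mpr ⟨hxW, nodup_winners pre st.best⟩)
      (fun k => by rw [hWmem k]; simp; tauto)]
    rw [h.nwin]
    push_cast [List.length_cons]
    ring

-- invariant preservation, case c < best (winner set unchanged)
theorem step_case3 (pre : List Int) (x : Int) (st : BSt) (h : LInv pre st)
    (fp2 : PySem.Dict Int Int)
    (hfp2 : ∀ k, fp2.get? k = (PySem.List.index? (pre ++ [x]) k).map (fun n => (n : Int)))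
    (hlt : st.counts.getD x 0 + 1 < st.best) :
    LInv (pre ++ [x]) ⟨fp2, st.counts.insert x (st.counts.getD x 0 + 1), st.best,
      st.first, st.last, st.lo, st.hi, st.nwin⟩ := by
  have hcx := h.counts x
  have hc : st.counts.getD x 0 + 1 = (pre.count x : Int) + 1 := by rw [hcx]
  have hpre : pre ≠ [] := by
    intro h0
    have hb := h.best0 h0
    rw [hc, h0] at hlt
    simp at hlt
    omega
  have hcnt' : ∀ k, (st.counts.insert x (st.counts.getD x 0 + 1)).getD k 0
      = (((pre ++ [x]).count k : Nat) : Int) := by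
    intro k
    rw [PySem.Dict.getD_insert, count_append_int pre x k]
    by_cases hk : k = x
    · subst hk; simp [hc]
    · simp [hk, h.counts k]
  have hub : ∀ k ∈ pre ++ [x], (((pre ++ [x]).count k : Nat) : Int) ≤ st.best := by
    intro k hk
    rw [count_append_int pre x k]
    by_cases hkx : k = x
    · subst hkx; omega
    · have hk' : k ∈ pre := by
        rcases List.mem_append.mp hk with h' | h'
        · exact h'
        · exact absurd (by simpa using h') hkx
      have := h.ub k hk'
      simp only [hkx, if_false]
      omega
  have hWmem : ∀ k, k ∈ winners (pre ++ [x]) st.best ↔ k ∈ winners pre st.best := by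
    intro k
    rw [mem_winners, mem_winners]
    constructor
    · rintro ⟨hk, hkc⟩
      by_cases hkx : k = x
      · subst hkx
        rw [count_append_int, if_pos rfl] at hkc
        omega
      · have hk' : k ∈ pre := by
          rcases List.mem_append.mp hk with h' | h'
          · exact h'
          · exact absurd (by simpa using h') hkx
        rw [count_append_int pre x k, if_neg hkx] at hkc
        exact ⟨hk', by omega⟩
    · rintro ⟨hk, hkc⟩
      have hkx : k ≠ x := by rintro rfl; omega
      refine ⟨List.mem_append_left _ hk, ?_⟩
      rw [count_append_int pre x k, if_neg hkx]
      omega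
  obtain ⟨f, hf1, hf2, hf3, hf4⟩ := h.fst hpre
  obtain ⟨g, hg1, hg2, hg3, hg4⟩ := h.lst hpre
  have hfpre : f ∈ pre := ((mem_winners _ _ _).mp hf2).1
  have hgpre : g ∈ pre := ((mem_winners _ _ _).mp hg2).1
  refine ⟨hcnt', hfp2, hub, ?_, ?_, ?_, by simp⟩
  · intro _
    refine ⟨f, hf1, (hWmem f).mpr hf2, by rw [hf3, pidx_append_of_mem _ _ _ hfpre], ?_⟩
    intro k hk
    have hkW := (hWmem k).mp hk
    have hkpre : k ∈ pre := ((mem_winners _ _ _).mp hkW).1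
    rw [pidx_append_of_mem _ _ _ hfpre, pidx_append_of_mem _ _ _ hkpre]
    exact hf4 k hkW
  · intro _
    refine ⟨g, hg1, (hWmem g).mpr hg2, by rw [hg3, pidx_append_of_mem _ _ _ hgpre], ?_⟩
    intro k hk
    have hkW := (hWmem k).mp hk
    have hkpre : k ∈ pre := ((mem_winners _ _ _).mp hkW).1
    rw [pidx_append_of_mem _ _ _ hgpre, pidx_append_of_mem _ _ _ hkpre]
    exact hg4 k hkW
  · show st.nwin = _
    rw [winners_length_cast _ _ (winners pre st.best) (nodup_winners pre st.best)
      (fun k => hWmem k)]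
    exact h.nwin

theorem inv_step (pre : List Int) (st : BSt) (x : Int) (h : LInv pre st) :
    LInv (pre ++ [x]) (bStep st ((pre.length : Int), x)) := by
  by_cases hxp : x ∈ pre
  · rcases (PySem.List.index?_isSome_iff pre x).mpr hxp |> Option.isSome_iff_exists.mp with ⟨n, hn⟩
    have hfpx : st.fp.get? x = some ((n : Nat) : Int) := by rw [h.fp x, hn]; rfl
    have hp : ((n : Nat) : Int) = pidx (pre ++ [x]) x := by
      rw [pidx_append_of_mem _ _ _ hxp]
      unfold pidx
      rw [hn]
      rfl
    have hfp2 : ∀ k, st.fp.get? k = (PySem.List.index? (pre ++ [x]) k).map (fun n => (n : Int)) := by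
      intro k
      by_cases hk : k ∈ pre
      · rw [PySem.List.index?_append_of_mem _ hk]; exact h.fp k
      · have hkx : k ≠ x := fun e => hk (e ▸ hxp)
        rw [h.fp k, (PySem.List.index?_eq_none_iff pre k).mpr hk,
            index?_append_not_mem pre x k hk hkx]
    simp only [bStep, hfpx]
    by_cases h1 : st.counts.getD x 0 + 1 > st.best
    · rw [if_pos h1]
      exact step_case1 pre x st h st.fp _ hfp2 hp h1
    · rw [if_neg h1]
      by_cases h2 : st.counts.getD x 0 + 1 = st.best
      · rw [if_pos (show (st.counts.getD x 0 + 1 == st.best) = true from beq_iff_eq.mpr h2)]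
        exact step_case2 pre x st h st.fp _ hfp2 hp h2
      · rw [if_neg (show ¬ (st.counts.getD x 0 + 1 == st.best) = true by simpa using h2)]
        exact step_case3 pre x st h st.fp hfp2 (by omega)
  · have hfpx : st.fp.get? x = none := by
      rw [h.fp x, (PySem.List.index?_eq_none_iff pre x).mpr hxp]
      rfl
    have hp : ((pre.length : Nat) : Int) = pidx (pre ++ [x]) x := (pidx_append_self pre x hxp).symm
    have hfp2 : ∀ k, (st.fp.insert x ((pre.length : Nat) : Int)).get? k
        = (PySem.List.index? (pre ++ [x]) k).map (fun n => (n : Int)) := by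
      intro k
      rw [PySem.Dict.get?_insert]
      by_cases hk : k = x
      · subst hk
        rw [if_pos rfl, PySem.List.index?_append_singleton_self _ _ hxp]
        rfl
      · rw [if_neg hk]
        by_cases hk' : k ∈ pre
        · rw [PySem.List.index?_append_of_mem _ hk']; exact h.fp k
        · rw [h.fp k, (PySem.List.index?_eq_none_iff pre k).mpr hk',
              index?_append_not_mem pre x k hk' hk]
    simp only [bStep, hfpx]
    by_cases h1 : st.counts.getD x 0 + 1 > st.best
    · rw [if_pos h1]
      exact step_case1 pre x st h _ _ hfp2 hp h1
    · rw [if_neg h1]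
      by_cases h2 : st.counts.getD x 0 + 1 = st.best
      · rw [if_pos (show (st.counts.getD x 0 + 1 == st.best) = true from beq_iff_eq.mpr h2)]
        exact step_case2 pre x st h _ _ hfp2 hp h2
      · rw [if_neg (show ¬ (st.counts.getD x 0 + 1 == st.best) = true by simpa using h2)]
        exact step_case3 pre x st h _ hfp2 (by omega)

theorem inv_foldl (suf : List Int) (pre : List Int) (st : BSt) (h : LInv pre st) :
    LInv (pre ++ suf) ((PySem.List.enumerate suf (pre.length : Int)).foldl bStep st) := by
  induction suf generalizing pre st with
  | nil => simpa using h
  | cons y t ih =>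
    rw [PySem.List.enumerate_cons, List.foldl_cons]
    have h' := inv_step pre st y h
    have h2 := ih (pre ++ [y]) _ h'
    have : ((pre ++ [y]).length : Int) = (pre.length : Int) + 1 := by simp
    rw [this] at h2
    simpa [List.append_assoc] using h2

-- A's insert loop stores the (d-independent) total count for each key.
theorem getD_foldl_insert_count (l : List Int) (xs : List Int) (d : PySem.Dict Int Int) (k : Int) :
    (xs.foldl (fun d x => d.insert x ((l.count x : Int))) d).getD k 0
      = if k ∈ xs then (l.count k : Int) else d.getD k 0 := by
  induction xs generalizing d with
  | nil => simp
  | cons x t ih =>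
    simp only [List.foldl_cons, ih, List.mem_cons]
    by_cases hk : k ∈ t
    · simp [hk]
    · by_cases hx : k = x
      · subst hx; simp [hk, PySem.Dict.getD_insert_self]
      · simp only [hk, hx, if_false, or_self]
        exact PySem.Dict.getD_insert_of_ne d _ _ hx

-- A's dict equals Counter(elements).
theorem xifi_eq_counter (l : List Int) : get_xifi_hash l = PySem.Dict.counter l := by
  apply PySem.Dict.ext
  have hnd : (get_xifi_hash l).keys.Nodup := by
    apply PySem.Dict.nodup_keys_foldl_insert
    simp [PySem.Dict.keys_empty]
  have hkeys : (get_xifi_hash l).keys = PySem.Set.ofList l := by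
    unfold get_xifi_hash
    rw [PySem.Dict.keys_foldl_insert]
    simp [PySem.Dict.keys_empty, PySem.Set.update_nil_left]
  rw [PySem.Dict.items_eq_map_keys _ hnd 0, hkeys, PySem.Dict.items_counter]
  apply List.map_congr_left
  intro k hk
  have hkl : k ∈ l := (PySem.Set.mem_ofList l k).mp hk
  unfold get_xifi_hash
  rw [getD_foldl_insert_count]
  simp [hkl]

-- mode[len(mode)-1] is the last element
theorem pyGetD_len_sub_one (m : List String) (hm : m ≠ []) :
    PySem.List.pyGetD m ((m.length : Int) - 1) "" = m.getLast hm := by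
  have hlen : 0 < m.length := List.length_pos_iff.mpr hm
  have e2 : PySem.List.pyIdx? m.length ((m.length : Int) - 1) = some (m.length - 1) := by
    simp only [PySem.List.pyIdx?]
    rw [if_pos (by omega), if_pos (by omega)]
    congr 1
    omega
  have h3 : m[(m.length - 1)]? = some (m.getLast hm) := by
    rw [List.getLast_eq_getElem]
    exact List.getElem?_eq_getElem (by omega)
  simp [PySem.List.pyGetD, PySem.List.pyGet?, e2, h3]

theorem statistical_mode_eq_alt (l : List Int) (hne : l ≠ []) :
    statistical_mode l = statistical_mode_alt l := by
  have hinv : LInv l ((PySem.List.enumerate l).foldl bStep bInit) := by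
    have h0 := inv_foldl l [] bInit inv_init
    simpa using h0
  simp only [statistical_mode, statistical_mode_alt]
  set st := (PySem.List.enumerate l).foldl bStep bInit with hst
  obtain ⟨f, hf1, hf2, hf3, hf4⟩ := hinv.fst hne
  obtain ⟨g, hg1, hg2, hg3, hg4⟩ := hinv.lst hne
  have hWne : winners l st.best ≠ [] := List.ne_nil_of_mem hf2
  rw [xifi_eq_counter]
  have hvals : (PySem.Dict.counter l).values
      = (PySem.Set.ofList l).map (fun k => ((l.count k : Nat) : Int)) := by
    show (PySem.Dict.counter l).items.map (·.2) = _
    rw [PySem.Dict.items_counter]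
    simp [List.map_map, Function.comp_def]
  have hmax : PySem.List.max? (PySem.Dict.counter l).values (fun y => y) = some st.best := by
    rw [hvals]
    apply max?_eq_some_of
    · rcases (mem_winners l st.best f).mp hf2 with ⟨hfl, hfc⟩
      exact List.mem_map.mpr ⟨f, (PySem.Set.mem_ofList l f).mpr hfl, hfc⟩
    · intro y hy
      rcases List.mem_map.mp hy with ⟨k, hk, rfl⟩
      exact hinv.ub k ((PySem.Set.mem_ofList l k).mp hk)
  rw [hmax]
  dsimp only
  have hmode : (PySem.Dict.counter l).items.foldl
      (fun m p => if p.2 == st.best then m ++ [PySem.Int.toStr p.1] else m) []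
      = (winners l st.best).map PySem.Int.toStr := by
    rw [PySem.Dict.items_counter]
    rw [show ((PySem.Set.ofList l).map (fun k => (k, ((l.count k : Nat) : Int)))).foldl
        (fun m p => if p.2 == st.best then m ++ [PySem.Int.toStr p.1] else m) ([] : List String)
        = (((PySem.Set.ofList l).map (fun k => (k, ((l.count k : Nat) : Int)))).filter
            (fun p => p.2 == st.best)).map (fun p => PySem.Int.toStr p.1) from by
      simpa using PySem.List.foldl_append_if (fun p : Int × Int => p.2 == st.best)
        (fun p : Int × Int => PySem.Int.toStr p.1)
        ((PySem.Set.ofList l).map (fun k => (k, ((l.count k : Nat) : Int)))) []]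
    rw [List.filter_map, List.map_map]
    rfl
  have hhead? : (winners l st.best).head? = some f := by
    rw [← head_of_min (pidx l) _ (pairwise_pidx_winners l st.best) f hf2 hf4 hWne]
    exact List.head?_eq_some_head hWne
  have hlast? : (winners l st.best).getLast? = some g := by
    rw [← getLast_of_max (pidx l) _ (pairwise_pidx_winners l st.best) g hg2 hg4 hWne]
    exact List.getLast?_eq_some_getLast hWne
  rw [hmode]
  have hnwin := hinv.nwin
  rcases hW : winners l st.best with _ | ⟨a, t⟩
  · exact absurd hW hWne
  rw [hW] at hhead? hlast? hnwin
  have haf : a = f := by simpa using hhead?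
  rw [haf] at hlast? ⊢
  by_cases ht : t = []
  · subst ht
    have h1 : (([f].map PySem.Int.toStr).length == 1) = true := by simp
    rw [if_pos h1]
    have h2 : (st.nwin == 1) = true := by
      rw [hnwin]; simp
    rw [if_pos h2, hf1]
    simp [pyStrOptInt, PySem.List.pyGetD_zero_cons]
  · have hlen2 : 1 < ((f :: t).map PySem.Int.toStr).length := by
      simp
      exact List.length_pos_iff.mpr ht
    rw [if_neg (by simp; omega), if_pos (by simpa using hlen2)]
    have h2 : (st.nwin == 1) = false := by
      rw [hnwin]
      have : 0 < t.length := List.length_pos_iff.mpr ht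
      simp
      omega
    rw [h2]
    simp only [Bool.false_eq_true, if_false]
    rw [hf1, hg1]
    have hM : ((f :: t).map PySem.Int.toStr) = PySem.Int.toStr f :: t.map PySem.Int.toStr := rfl
    have hMne : ((f :: t).map PySem.Int.toStr) ≠ [] := by simp
    have hlast : ((f :: t).map PySem.Int.toStr).getLast hMne = PySem.Int.toStr g := by
      have h5 : ((f :: t).map PySem.Int.toStr).getLast?
          = Option.map PySem.Int.toStr ((f :: t).getLast?) := List.getLast?_map
      rw [hlast?, List.getLast?_eq_some_getLast hMne] at h5
      simpa using h5
    rw [pyGetD_len_sub_one _ hMne, hlast]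
    simp [pyStrOptInt, PySem.List.pyGetD_zero_cons]

-- ===== VERDICT (by name: the statement is the Claim_ definition above) =====
theorem statistical_mode_spec : Claim_equal_statistical_mode := by
  intro elements _ hpre
  unfold Spec_statistical_mode
  exact statistical_mode_eq_alt elements hpre
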